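-- pv_equiv track=rewrite | github.com/dkvg-77/nit_calicut2 | mod3Module.py | get_signal_location_vector
-- ===== SOURCE A (Python) =====
-- def get_signal_location_vector(cl_seq, mcl_loc, nmcl_loc):
--     mcl_len = len(mcl_loc)
--     signal_loc_vector = []
--     for i in range(mcl_len):
--         temp = []
--         for ele in nmcl_loc:
--             temp.append(ele)
--         for j in range(mcl_len):
--             if i!=j:
--                 temp.append(mcl_loc[j])
--         temp.sort()
--         #temp.remove(mcl_loc[i])
--         signal_loc_vector.append(temp)
--     return signal_loc_vector
-- ===== SOURCE B (Python) =====
-- def get_signal_location_vector(cl_seq, mcl_loc, nmcl_loc):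
--     base = sorted(nmcl_loc + mcl_loc)
--     out = []
--     for v in mcl_loc:
--         t = base.copy()
--         t.remove(v)
--         out.append(t)
--     return out
-- ===== Notes on version B (the rewrite author's own statement) =====
-- stated objective: faster
-- what changed: Instead of rebuilding and sorting the combined list from scratch for every mcl index, B sorts the combined list once and, for each mcl element, copies it and removes one occurrence of that element (removing one occurrence of a value from the sorted multiset yields the same sorted list as sorting the multiset without it).
import Mathlib
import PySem

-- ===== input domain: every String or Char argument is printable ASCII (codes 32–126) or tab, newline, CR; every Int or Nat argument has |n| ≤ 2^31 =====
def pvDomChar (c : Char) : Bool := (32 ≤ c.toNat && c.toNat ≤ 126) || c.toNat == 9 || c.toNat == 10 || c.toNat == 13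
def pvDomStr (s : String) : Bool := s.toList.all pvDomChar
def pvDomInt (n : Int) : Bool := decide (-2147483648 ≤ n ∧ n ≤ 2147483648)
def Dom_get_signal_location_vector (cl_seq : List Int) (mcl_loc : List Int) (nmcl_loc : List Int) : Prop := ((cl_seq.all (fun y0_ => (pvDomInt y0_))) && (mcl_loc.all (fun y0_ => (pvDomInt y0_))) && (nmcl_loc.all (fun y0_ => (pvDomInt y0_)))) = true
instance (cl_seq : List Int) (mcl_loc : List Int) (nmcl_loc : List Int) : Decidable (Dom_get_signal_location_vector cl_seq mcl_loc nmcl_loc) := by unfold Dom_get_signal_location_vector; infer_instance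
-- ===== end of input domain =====

-- B sorts the combined list once and removes one occurrence per mcl element,
-- instead of rebuilding and re-sorting the combined list for every mcl index.

-- ===== PORT A =====
def get_signal_location_vector (cl_seq : List Int) (mcl_loc : List Int) (nmcl_loc : List Int) : List (List Int) :=
  let mcl_len : Int := PySem.List.len mcl_loc
  (PySem.List.pyRange 0 mcl_len).foldl (fun signal_loc_vector i =>
    let temp := nmcl_loc.foldl (fun temp ele => temp ++ [ele]) []
    -- mcl_loc[j]: j always in range (0 ≤ j < len), so the default 0 is never used
    let temp := (PySem.List.pyRange 0 mcl_len).foldl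
      (fun temp j => if i ≠ j then temp ++ [PySem.List.pyGetD mcl_loc j 0] else temp) temp
    let temp := PySem.List.sorted temp (fun x => x)
    signal_loc_vector ++ [temp]) []

-- ===== PORT B =====
def get_signal_location_vector_alt (cl_seq : List Int) (mcl_loc : List Int) (nmcl_loc : List Int) : List (List Int) :=
  let base := PySem.List.sorted (nmcl_loc ++ mcl_loc) (fun x => x)
  mcl_loc.foldl (fun out v =>
    -- t.remove(v): v ∈ base always (v comes from mcl_loc ⊆ base), so ValueError is impossible
    let t := (PySem.List.remove? base v).getD base
    out ++ [t]) []

-- ===== PRECONDITION & SPEC =====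
def Spec_get_signal_location_vector (cl_seq : List Int) (mcl_loc : List Int) (nmcl_loc : List Int) (out : List (List Int)) : Prop := out = get_signal_location_vector_alt cl_seq mcl_loc nmcl_loc
instance (cl_seq : List Int) (mcl_loc : List Int) (nmcl_loc : List Int) (out : List (List Int)) : Decidable (Spec_get_signal_location_vector cl_seq mcl_loc nmcl_loc out) := by unfold Spec_get_signal_location_vector; infer_instance

-- ===== CLAIM (what is proved, stated in full; the proofs are below) =====
def Claim_equal_get_signal_location_vector : Prop := ∀ (cl_seq : List Int) (mcl_loc : List Int) (nmcl_loc : List Int), Dom_get_signal_location_vector cl_seq mcl_loc nmcl_loc → Spec_get_signal_location_vector cl_seq mcl_loc nmcl_loc (get_signal_location_vector cl_seq mcl_loc nmcl_loc)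

-- ===== LEMMAS AND PROOFS =====

-- the first n entries of mcl, read off by index through pyGetD
lemma map_pyGetD_pyRange_prefix (mcl : List Int) (n : Nat) (hn : n ≤ mcl.length) :
    (PySem.List.pyRange 0 (n : Int)).map (fun j => PySem.List.pyGetD mcl j 0) = mcl.take n := by
  apply List.ext_getElem
  · simp [PySem.List.length_pyRange_one, hn]
  · intro k h1 h2
    simp only [List.getElem_map, PySem.List.getElem_pyRange_one, zero_add]
    have hk : k < n := by
      have := h1; simpa [PySem.List.length_pyRange_one] using this
    have hkl : k < mcl.length := lt_of_lt_of_le hk hn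
    rw [PySem.List.pyGetD_natCast]
    simp [List.getD_eq_getElem?_getD, List.getElem?_eq_getElem hkl, List.getElem_take]

-- the j-loop of A with index i = n collects mcl with its n-th entry skipped
lemma jloop_filter_map (mcl : List Int) (n : Nat) (hn : n < mcl.length) :
    ((PySem.List.pyRange 0 (mcl.length : Int)).filter (fun j => decide ((n : Int) ≠ j))).map
      (fun j => PySem.List.pyGetD mcl j 0) = mcl.take n ++ mcl.drop (n + 1) := by
  have hsplit : PySem.List.pyRange 0 (mcl.length : Int)
      = PySem.List.pyRange 0 (n : Int) ++ PySem.List.pyRange (n : Int) (mcl.length : Int) :=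
    PySem.List.pyRange_one_append 0 (n : Int) (mcl.length : Int) (by positivity) (by exact_mod_cast hn.le)
  have hcons : PySem.List.pyRange (n : Int) (mcl.length : Int)
      = (n : Int) :: PySem.List.pyRange ((n : Int) + 1) (mcl.length : Int) :=
    PySem.List.pyRange_one_cons (by exact_mod_cast hn)
  rw [hsplit, hcons, List.filter_append, List.filter_cons]
  have hpre : (PySem.List.pyRange 0 (n : Int)).filter (fun j => decide ((n : Int) ≠ j))
      = PySem.List.pyRange 0 (n : Int) := by
    apply List.filter_eq_self.mpr
    intro j hj
    have := PySem.List.mem_pyRange_one.mp hj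
    simp; omega
  have hsuf : (PySem.List.pyRange ((n : Int) + 1) (mcl.length : Int)).filter
      (fun j => decide ((n : Int) ≠ j)) = PySem.List.pyRange ((n : Int) + 1) (mcl.length : Int) := by
    apply List.filter_eq_self.mpr
    intro j hj
    have := PySem.List.mem_pyRange_one.mp hj
    simp; omega
  have hself : (decide ((n : Int) ≠ (n : Int))) = false := by simp
  rw [hpre, hsuf, hself]
  simp only [Bool.false_eq_true, if_false]
  simp only [List.map_append]
  rw [map_pyGetD_pyRange_prefix mcl n hn.le]
  have hsufmap : (PySem.List.pyRange ((n : Int) + 1) (mcl.length : Int)).map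
      (fun j => PySem.List.pyGetD mcl j 0) = mcl.drop ((n : Int) + 1).toNat := by
    exact PySem.List.map_pyGetD_pyRange' mcl 0 (by positivity)
  rw [hsufmap]
  norm_num

-- per-index agreement: sorting A's i-th temp equals erasing mcl[n] from the sorted combined list
lemma body_eq (mcl nmcl : List Int) (n : Nat) (hn : n < mcl.length) :
    PySem.List.sorted
      ((PySem.List.pyRange 0 (mcl.length : Int)).foldl
        (fun temp j => if (n : Int) ≠ j then temp ++ [PySem.List.pyGetD mcl j 0] else temp) nmcl)
      (fun x => x)
    = (PySem.List.sorted (nmcl ++ mcl) (fun x => x)).erase mcl[n] := by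
  have hfun : (fun (temp : List Int) j => if (n : Int) ≠ j then temp ++ [PySem.List.pyGetD mcl j 0] else temp)
      = (fun temp j => if decide ((n : Int) ≠ j) = true then temp ++ [PySem.List.pyGetD mcl j 0] else temp) := by
    funext t j; by_cases h : (n : Int) = j <;> simp [h]
  rw [hfun, PySem.List.foldl_append_if, jloop_filter_map mcl n hn]
  set v := mcl[n] with hv
  set Y : List Int := nmcl ++ (mcl.take n ++ mcl.drop (n + 1)) with hY
  apply PySem.List.sorted_id_eq_of_perm_of_pairwise
  · -- (sorted (nmcl ++ mcl)).erase v  ~  nmcl ++ (take n ++ drop (n+1))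
    have hmcl : mcl = mcl.take n ++ v :: mcl.drop (n + 1) := by
      conv_lhs => rw [← List.take_append_drop n mcl]
      congr 1
      rw [hv, List.getElem_cons_drop]
    have hperm1 : (nmcl ++ mcl).Perm (v :: Y) := by
      calc (nmcl ++ mcl).Perm (nmcl ++ (v :: (mcl.take n ++ mcl.drop (n + 1)))) := by
            apply List.Perm.append_left
            conv_lhs => rw [hmcl]
            exact List.perm_middle
        _ = nmcl ++ v :: (mcl.take n ++ mcl.drop (n + 1)) := rfl
        _ |>.Perm (v :: Y) := by rw [hY]; exact List.perm_middle
    have : ((nmcl ++ mcl).erase v).Perm ((v :: Y).erase v) := hperm1.erase v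
    rw [List.erase_cons_head] at this
    exact ((PySem.List.sorted_perm (nmcl ++ mcl) (fun x => x) false).erase v).trans this
  · exact List.Pairwise.sublist (List.erase_sublist) (PySem.List.sorted_pairwise (nmcl ++ mcl) (fun x => x))

-- ===== VERDICT (by name: the statement is the Claim_ definition above) =====
theorem get_signal_location_vector_spec : Claim_equal_get_signal_location_vector := by
  intro cl_seq mcl_loc nmcl_loc _
  unfold Spec_get_signal_location_vector
  simp only [get_signal_location_vector, get_signal_location_vector_alt,
    PySem.List.foldl_append_singleton, List.nil_append, PySem.List.len_eq]
  rw [PySem.List.foldl_append_singleton_eq_map, PySem.List.foldl_append_singleton_eq_map]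
  simp only [List.nil_append]
  apply List.ext_getElem
  · simp [PySem.List.length_pyRange_one]
  · intro k h1 h2
    have hk : k < mcl_loc.length := by
      simpa [PySem.List.length_pyRange_one] using h1
    simp only [List.getElem_map, PySem.List.getElem_pyRange_one, zero_add]
    rw [body_eq mcl_loc nmcl_loc k hk]
    have hmem : mcl_loc[k] ∈ PySem.List.sorted (nmcl_loc ++ mcl_loc) (fun x => x) false := by
      rw [PySem.List.mem_sorted]
      exact List.mem_append_right _ (List.getElem_mem hk)
    rw [PySem.List.remove?_eq_some_erase _ _ hmem]
    rfl
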